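-- pv_equiv track=rewrite | github.com/MUAHAHAHAHAHAHAA/Python-Compression | uwu.py | uwu
-- ===== SOURCE A (Python) =====
-- def uwu(text):
--     res = []
--     for char in text:
--         res.append(
--             '{0:08b}'.format(ord(char))
--             .replace("0", "u")
--             .replace("1", "w"))
--     return res
-- ===== SOURCE B (Python) =====
-- def uwu(text):
--     def bits(n):
--         width = max(8, n.bit_length())
--         return ''.join('w' if (n >> i) & 1 else 'u' for i in range(width - 1, -1, -1))
--     return [bits(ord(c)) for c in text]
-- ===== Notes on version B (the rewrite author's own statement) =====
-- stated objective: alternative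
-- what changed: B extracts each of the max(8, bit_length) bits directly with shifts and emits 'u'/'w' immediately, replacing A's binary string formatting followed by two whole-string replace passes.
import Mathlib
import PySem

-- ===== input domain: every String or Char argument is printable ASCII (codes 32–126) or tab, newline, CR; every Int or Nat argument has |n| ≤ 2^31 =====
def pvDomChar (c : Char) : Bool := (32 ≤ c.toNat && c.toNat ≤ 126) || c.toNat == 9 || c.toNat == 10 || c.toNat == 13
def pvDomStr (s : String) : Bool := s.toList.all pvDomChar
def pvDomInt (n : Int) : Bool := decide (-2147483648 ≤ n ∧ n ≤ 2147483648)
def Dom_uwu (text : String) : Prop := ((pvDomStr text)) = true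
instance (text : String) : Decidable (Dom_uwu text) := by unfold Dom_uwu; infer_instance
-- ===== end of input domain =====

-- B replaces A's '{0:08b}'.format + two .replace passes by direct bit extraction
-- (shift-and-test over max(8, bit_length) positions, emitting 'u'/'w' immediately); alternative decomposition, same cost.

-- ===== PORT A =====
-- binary digits of n (most significant first), as '{0:b}' produces; fuel = n is enough since n/2 strictly decreases
def uwuBinDigits : Nat → Nat → List Char
  | 0, _ => []
  | fuel+1, n => if n = 0 then [] else uwuBinDigits fuel (n / 2) ++ [if n % 2 = 1 then '1' else '0']

-- '{0:08b}'.format(n) : digits left-padded with '0' to width 8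
def uwuFmt8 (n : Nat) : String :=
  let ds := uwuBinDigits n n
  String.mk (List.replicate (8 - ds.length) '0' ++ ds)

-- the per-character string A appends
def uwuCharA (n : Nat) : String :=
  PySem.Str.replace (PySem.Str.replace (uwuFmt8 n) "0" "u") "1" "w"

def uwu (text : String) : List String :=
  text.toList.foldl (fun res c => res ++ [uwuCharA c.toNat]) []

-- ===== PORT B =====
-- the per-character string B builds: bits from position width-1 down to 0
def uwuCharB (n : Nat) : String :=
  let width := max 8 (PySem.Int.bitLength (n : Int))
  String.mk ((List.range width).reverse.map (fun i => if (n >>> i) &&& 1 = 1 then 'w' else 'u'))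

def uwu_alt (text : String) : List String :=
  text.toList.map (fun c => uwuCharB c.toNat)

-- ===== PRECONDITION & SPEC =====
def Spec_uwu (text : String) (out : List String) : Prop := out = uwu_alt text
instance (text : String) (out : List String) : Decidable (Spec_uwu text out) := by unfold Spec_uwu; infer_instance

-- ===== CLAIM (what is proved, stated in full; the proofs are below) =====
def Claim_equal_uwu : Prop := ∀ (text : String), Dom_uwu text → Spec_uwu text (uwu text)

-- ===== LEMMAS AND PROOFS =====
lemma uwuChar_eq_of_small : ∀ n < 127, uwuCharA n = uwuCharB n := by
  have h : (List.range 127).all (fun n => uwuCharA n == uwuCharB n) = true := by decide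
  intro n hn
  have := List.all_eq_true.mp h n (List.mem_range.mpr hn)
  simpa using this

lemma uwuChar_eq_of_dom (c : Char) (hc : pvDomChar c = true) :
    uwuCharA c.toNat = uwuCharB c.toNat := by
  apply uwuChar_eq_of_small
  simp [pvDomChar] at hc
  omega

lemma uwu_foldl_eq (l : List Char) (h : l.all pvDomChar = true) :
    ∀ acc : List String,
      l.foldl (fun res c => res ++ [uwuCharA c.toNat]) acc
        = acc ++ l.map (fun c => uwuCharB c.toNat) := by
  induction l with
  | nil => intro acc; simp
  | cons c t ih =>
      simp only [List.all_cons, Bool.and_eq_true] at h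
      intro acc
      simp only [List.foldl_cons, List.map_cons]
      rw [ih h.2, uwuChar_eq_of_dom c h.1]; simp

-- ===== VERDICT (by name: the statement is the Claim_ definition above) =====
theorem uwu_spec : Claim_equal_uwu := by
  intro text h
  unfold Spec_uwu uwu uwu_alt
  have := uwu_foldl_eq text.toList h []
  simpa using this
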